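-- pv_equiv track=rewrite | github.com/ganguloo/sandbox | gray/validator.py | generate_theorem2
-- ===== SOURCE A (Python) =====
-- def get_binary(val, n):
--     return [int(x) for x in format(val, f'0{n}b')]
--
-- def generate_theorem1(b, n):
--     ineqs = set()
--     b_bin = get_binary(b, n)
--     for k in range(1, n + 1):
--         if b_bin[k-1] == 0:
--             S_k = [j for j in range(1, k) if b_bin[j-1] == 1] + [k]
--             blocks = []
--             if S_k:
--                 current_block = [S_k[0]]
--                 for j in S_k[1:]:
--                     if j == current_block[-1] + 1:
--                         current_block.append(j)
--                     else:
--                         blocks.append(current_block)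
--                         current_block = [j]
--                 blocks.append(current_block)
--
--             p = len(blocks)
--             coeffs = [0] * n
--             for block in blocks:
--                 coeffs[block[0]-1] = 1
--                 for j in block[1:]:
--                     coeffs[j-1] = -1
--             ineqs.add((tuple(coeffs), p - 1))
--     return ineqs
--
-- def generate_theorem2(a, n):
--     b_prime = (2**n - 1) - a
--     base_ineqs = generate_theorem1(b_prime, n)
--     mirrored = set()
--     for coeffs, rhs in base_ineqs:
--         c = list(coeffs)
--         c1 = c[0]
--         c[0] = -c1
--         new_rhs = rhs - c1
--         mirrored.add((tuple(c), new_rhs))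
--     return mirrored
-- ===== SOURCE B (Python) =====
-- def get_binary(val, n):
--     return [int(x) for x in format(val, f'0{n}b')]
--
-- def generate_theorem2(a, n):
--     # one pass per k builds the base inequality straight from run-start
--     # membership tests (no S_k list, no blocks accumulator); then the
--     # mirror transform is applied as in the original.
--     bits = get_binary((2**n - 1) - a, n)
--     base = set()
--     for k in range(1, n + 1):
--         if bits[k-1] == 0:
--             def in_S(j):
--                 return j == k or (1 <= j < k and bits[j-1] == 1)
--             coeffs = [0] * n
--             p = 0
--             for j in range(1, k + 1):
--                 if in_S(j):
--                     if in_S(j - 1):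
--                         coeffs[j-1] = -1
--                     else:
--                         coeffs[j-1] = 1
--                         p += 1
--             base.add((tuple(coeffs), p - 1))
--     mirrored = set()
--     for coeffs, rhs in base:
--         c = list(coeffs)
--         c1 = c[0]
--         c[0] = -c1
--         mirrored.add((tuple(c), rhs - c1))
--     return mirrored
-- ===== Notes on version B (the rewrite author's own statement) =====
-- stated objective: alternative
-- what changed: Instead of materialising S_k and chopping it into consecutive-run blocks with an accumulator loop, B builds each base inequality in a single sweep over 1..k using a membership predicate (a run starts at j exactly when j is in S_k and j-1 is not), computing the coefficient vector and the run count p directly, so the S_k list, the blocks list and the block-accumulator loop disappear; the mirror pass is kept as in A.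
import Mathlib
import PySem

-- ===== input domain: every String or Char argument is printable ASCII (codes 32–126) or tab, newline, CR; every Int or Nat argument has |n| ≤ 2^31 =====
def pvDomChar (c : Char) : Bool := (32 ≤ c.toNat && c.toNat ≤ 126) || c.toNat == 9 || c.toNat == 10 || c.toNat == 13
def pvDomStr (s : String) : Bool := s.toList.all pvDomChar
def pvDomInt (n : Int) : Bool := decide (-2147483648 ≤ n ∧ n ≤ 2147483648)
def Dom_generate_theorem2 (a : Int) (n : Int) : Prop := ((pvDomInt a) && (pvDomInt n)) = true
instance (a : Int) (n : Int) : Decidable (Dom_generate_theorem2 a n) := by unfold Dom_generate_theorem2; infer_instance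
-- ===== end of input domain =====

-- B is the same task by a different decomposition: no S_k list and no blocks
-- accumulator — each base inequality is built in one pass from run-start
-- membership tests; the mirror pass is unchanged.

-- ===== PORT A =====
-- shared helper: Python get_binary (identical in A and B); digits of a nonneg value, MSB first
def pvBinDigits : Nat → List Int
  | 0 => []
  | v + 1 => pvBinDigits ((v + 1) / 2) ++ [(((v + 1) % 2 : Nat) : Int)]
decreasing_by exact Nat.div_lt_self (Nat.succ_pos v) one_lt_two

-- format(val, f'0{n}b') for val ≥ 0, n ≥ 0 (Pre_ excludes val < 0 / n < 0, where Python raises)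
def get_binary (val : Int) (n : Int) : List Int :=
  let s := if val = 0 then [0] else pvBinDigits val.toNat
  List.replicate (n.toNat - s.length) 0 ++ s

-- the 'for j in S_k[1:]' block-accumulator step
def gtA_step (st : List (List Int) × List Int) (j : Int) : List (List Int) × List Int :=
  if j == PySem.List.pyGetD st.2 (-1) 0 + 1 then (st.1, st.2 ++ [j])
  else (st.1 ++ [st.2], [j])

def generate_theorem2 (a : Int) (n : Int) : List (List Int × Int) :=
  let b' : Int := (2 ^ n.toNat - 1) - a
  let bbin := get_binary b' n
  let ineqs : PySem.Set (List Int × Int) :=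
    (PySem.List.pyRange 1 (n + 1) 1).foldl (fun ineqs k =>
      if PySem.List.pyGetD bbin (k - 1) 0 == 0 then
        let S_k : List Int :=
          (PySem.List.pyRange 1 k 1).foldl
            (fun acc j => if PySem.List.pyGetD bbin (j - 1) 0 == 1 then acc ++ [j] else acc) [] ++ [k]
        let blocks : List (List Int) :=
          match S_k with
          | [] => []
          | s0 :: rest =>
            let st := rest.foldl gtA_step (([] : List (List Int)), [s0])
            st.1 ++ [st.2]
        let p : Int := blocks.length
        let coeffs : List Int :=
          blocks.foldl (fun c block =>
            match block with
            | [] => c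
            | b0 :: bt =>
              bt.foldl (fun c j => PySem.List.pySetD c (j - 1) (-1))
                (PySem.List.pySetD c (b0 - 1) 1)) (List.replicate n.toNat (0 : Int))
        PySem.Set.add ineqs (coeffs, p - 1)
      else ineqs) PySem.Set.empty
  ineqs.foldl (fun mirrored ci =>
    let c1 := PySem.List.pyGetD ci.1 0 0
    PySem.Set.add mirrored (PySem.List.pySetD ci.1 0 (-c1), ci.2 - c1)) PySem.Set.empty

-- ===== PORT B =====
def generate_theorem2_alt (a : Int) (n : Int) : List (List Int × Int) :=
  let bits := get_binary ((2 ^ n.toNat - 1) - a) n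
  let base : PySem.Set (List Int × Int) :=
    (PySem.List.pyRange 1 (n + 1) 1).foldl (fun base k =>
      if PySem.List.pyGetD bits (k - 1) 0 == 0 then
        let inS : Int → Bool := fun j =>
          j == k || (decide (1 ≤ j) && decide (j < k) && (PySem.List.pyGetD bits (j - 1) 0 == 1))
        let cp : List Int × Int :=
          (PySem.List.pyRange 1 (k + 1) 1).foldl (fun cp j =>
            if inS j then
              if inS (j - 1) then (PySem.List.pySetD cp.1 (j - 1) (-1), cp.2)
              else (PySem.List.pySetD cp.1 (j - 1) 1, cp.2 + 1)
            else cp) (List.replicate n.toNat (0 : Int), (0 : Int))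
        PySem.Set.add base (cp.1, cp.2 - 1)
      else base) PySem.Set.empty
  base.foldl (fun mirrored ci =>
    let c1 := PySem.List.pyGetD ci.1 0 0
    PySem.Set.add mirrored (PySem.List.pySetD ci.1 0 (-c1), ci.2 - c1)) PySem.Set.empty

-- ===== PRECONDITION & SPEC =====
-- Pre_ excludes exactly the inputs where Python A raises: n < 0 (invalid format spec)
-- and a > 2^n - 1 (b_prime negative, so int('-') raises ValueError).
def Pre_generate_theorem2 (a : Int) (n : Int) : Prop := 0 ≤ n ∧ a ≤ 2 ^ n.toNat - 1
instance (a : Int) (n : Int) : Decidable (Pre_generate_theorem2 a n) := by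
  unfold Pre_generate_theorem2; infer_instance
def pvWitness_generate_theorem2 : Int × Int := (5, 4)

def Spec_generate_theorem2 (a : Int) (n : Int) (out : List (List Int × Int)) : Prop :=
  out = generate_theorem2_alt a n
instance (a : Int) (n : Int) (out : List (List Int × Int)) : Decidable (Spec_generate_theorem2 a n out) := by
  unfold Spec_generate_theorem2; infer_instance

-- ===== CLAIM (what is proved, stated in full; the proofs are below) =====
def Claim_equal_generate_theorem2 : Prop := ∀ (a : Int) (n : Int), Dom_generate_theorem2 a n → Pre_generate_theorem2 a n → Spec_generate_theorem2 a n (generate_theorem2 a n)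

-- ===== LEMMAS AND PROOFS =====

-- proof-side abbreviations for the two loop bodies (literal copies of the ports' inner let-chains)
def pvElemA (bbin : List Int) (m : Nat) (k : Int) : List Int × Int :=
  let S_k : List Int :=
    (PySem.List.pyRange 1 k 1).foldl
      (fun acc j => if PySem.List.pyGetD bbin (j - 1) 0 == 1 then acc ++ [j] else acc) [] ++ [k]
  let blocks : List (List Int) :=
    match S_k with
    | [] => []
    | s0 :: rest =>
      let st := rest.foldl gtA_step (([] : List (List Int)), [s0])
      st.1 ++ [st.2]
  let p : Int := blocks.length
  let coeffs : List Int :=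
    blocks.foldl (fun c block =>
      match block with
      | [] => c
      | b0 :: bt =>
        bt.foldl (fun c j => PySem.List.pySetD c (j - 1) (-1))
          (PySem.List.pySetD c (b0 - 1) 1)) (List.replicate m (0 : Int))
  (coeffs, p - 1)

def pvElemB (bits : List Int) (m : Nat) (k : Int) : List Int × Int :=
  let inS : Int → Bool := fun j =>
    j == k || (decide (1 ≤ j) && decide (j < k) && (PySem.List.pyGetD bits (j - 1) 0 == 1))
  let cp : List Int × Int :=
    (PySem.List.pyRange 1 (k + 1) 1).foldl (fun cp j =>
      if inS j then
        if inS (j - 1) then (PySem.List.pySetD cp.1 (j - 1) (-1), cp.2)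
        else (PySem.List.pySetD cp.1 (j - 1) 1, cp.2 + 1)
      else cp) (List.replicate m (0 : Int), (0 : Int))
  (cp.1, cp.2 - 1)

def pvMirror (ci : List Int × Int) : List Int × Int :=
  (PySem.List.pySetD ci.1 0 (-(PySem.List.pyGetD ci.1 0 0)), ci.2 - PySem.List.pyGetD ci.1 0 0)

def pvSk (bbin : List Int) (k : Int) : List Int :=
  (PySem.List.pyRange 1 k 1).filter (fun j => PySem.List.pyGetD bbin (j - 1) 0 == 1) ++ [k]

-- runs recursion (the shape the block-accumulator fold computes)
def pvRuns (cb : List Int) (l : Int) : List Int → List (List Int)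
  | [] => [cb]
  | j :: rest => if j = l + 1 then pvRuns (cb ++ [j]) j rest else cb :: pvRuns [j] j rest

-- the (index, value) assignments contributed by the elements after the first
def pvTailAssign (l : Int) : List Int → List (Int × Int)
  | [] => []
  | j :: rest => (j - 1, if j = l + 1 then (-1 : Int) else 1) :: pvTailAssign j rest

def pvSetF (c : List Int) (iv : Int × Int) : List Int := PySem.List.pySetD c iv.1 iv.2

def pvPerBlock (b : List Int) : List (Int × Int) :=
  match b with
  | [] => []
  | b0 :: bt => (b0 - 1, (1 : Int)) :: bt.map (fun j => (j - 1, (-1 : Int)))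





lemma pvRuns_fold (rest : List Int) : ∀ (bs : List (List Int)) (cb : List Int), cb ≠ [] →
    (rest.foldl gtA_step (bs, cb)).1 ++ [(rest.foldl gtA_step (bs, cb)).2]
      = bs ++ pvRuns cb (PySem.List.pyGetD cb (-1) 0) rest := by
  induction rest with
  | nil => intro bs cb h; simp [pvRuns]
  | cons j rest ih =>
    intro bs cb h
    simp only [List.foldl_cons, gtA_step, pvRuns]
    by_cases hj : j = PySem.List.pyGetD cb (-1) 0 + 1
    · rw [if_pos (by simpa using hj), if_pos hj]
      rw [ih bs (cb ++ [j]) (by simp)]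
      rw [PySem.List.pyGetD_neg_one_append_singleton]
    · rw [if_neg (by simpa using hj), if_neg hj]
      rw [ih (bs ++ [cb]) [j] (by simp)]
      have hj1 : PySem.List.pyGetD [j] (-1) 0 = j := by
        simpa using PySem.List.pyGetD_neg_one_append_singleton (xs := []) (x := j) (d := 0)
      rw [hj1, List.append_assoc, List.singleton_append]

lemma pvRuns_flatMap (rest : List Int) : ∀ (l c0 : Int) (cbt : List Int),
    (pvRuns (c0 :: cbt) l rest).flatMap pvPerBlock
      = (c0 - 1, (1 : Int)) :: (cbt.map (fun j => (j - 1, (-1 : Int))) ++ pvTailAssign l rest) := by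
  induction rest with
  | nil => intro l c0 cbt; simp [pvRuns, pvPerBlock, pvTailAssign]
  | cons j rest ih =>
    intro l c0 cbt
    simp only [pvRuns, pvTailAssign]
    by_cases hj : j = l + 1
    · rw [if_pos hj, if_pos hj, show c0 :: cbt ++ [j] = c0 :: (cbt ++ [j]) by simp, ih]
      simp
    · rw [if_neg hj, if_neg hj]
      simp only [List.flatMap_cons, pvPerBlock]
      rw [ih j j []]
      simp

lemma pvRuns_length (rest : List Int) : ∀ (cb : List Int) (l : Int),
    (pvRuns cb l rest).length = 1 + (pvTailAssign l rest).countP (fun iv => iv.2 == 1) := by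
  induction rest with
  | nil => intro cb l; simp [pvRuns, pvTailAssign]
  | cons j rest ih =>
    intro cb l
    simp only [pvRuns, pvTailAssign]
    by_cases hj : j = l + 1
    · rw [if_pos hj, if_pos hj, ih]
      simp
    · rw [if_neg hj, if_neg hj]
      simp only [List.length_cons, ih, List.countP_cons]
      simp
      omega

lemma pvTailAssign_mem (S : List Int) (hS : S.Pairwise (· < ·)) :
    ∀ (rest pre : List Int) (l : Int), S = pre ++ l :: rest →
    pvTailAssign l rest = rest.map (fun j => (j - 1, if j - 1 ∈ S then (-1 : Int) else 1)) := by
  intro rest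
  induction rest with
  | nil => intro pre l h; simp [pvTailAssign]
  | cons j rest ih =>
    intro pre l hSeq
    simp only [pvTailAssign, List.map_cons]
    have hmem : j - 1 ∈ S ↔ j = l + 1 := by
      subst hSeq
      rw [List.pairwise_append] at hS
      obtain ⟨hpre, hcons, hcross⟩ := hS
      rw [List.pairwise_cons] at hcons
      obtain ⟨hl, hcons2⟩ := hcons
      rw [List.pairwise_cons] at hcons2
      obtain ⟨hj, _⟩ := hcons2
      have hlj : l < j := hl j (by simp)
      constructor
      · intro hin
        rcases List.mem_append.mp hin with hp | hc
        · have := hcross _ hp l (by simp); omega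
        · rcases List.mem_cons.mp hc with h1 | h2
          · omega
          · rcases List.mem_cons.mp h2 with h3 | h4
            · omega
            · have := hj _ h4; omega
      · intro h; subst h; simp
    have h1 : (if j = l + 1 then (-1 : Int) else 1) = (if j - 1 ∈ S then (-1 : Int) else 1) := by
      by_cases hj : j = l + 1
      · rw [if_pos hj, if_pos (hmem.mpr hj)]
      · rw [if_neg hj, if_neg (fun h => hj (hmem.mp h))]
    rw [h1, ih (pre ++ [l]) j (by simpa using hSeq)]

lemma pvSk_pairwise (bbin : List Int) (k : Int) : (pvSk bbin k).Pairwise (· < ·) := by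
  unfold pvSk
  rw [List.pairwise_append]
  refine ⟨(PySem.List.pairwise_lt_pyRange_one 1 k).filter _, by simp, ?_⟩
  intro x hx y hy
  have := (PySem.List.mem_pyRange_one).mp (List.mem_of_mem_filter hx)
  simp at hy
  omega

lemma foldl_flatMap_foldl {α β : Type} (g : β → List α) (f : List Int → α → List Int)
    (l : List β) (c : List Int) :
    l.foldl (fun c b => (g b).foldl f c) c = (l.flatMap g).foldl f c := by
  induction l generalizing c with
  | nil => rfl
  | cons b bt ih => simp [List.flatMap_cons, List.foldl_append, ih]



lemma pvSk_ne_nil (bbin : List Int) (k : Int) : pvSk bbin k ≠ [] := by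
  simp [pvSk]

lemma pvHead_not_mem (bbin : List Int) (k : Int) (s0 : Int) (rest : List Int)
    (hS : pvSk bbin k = s0 :: rest) : s0 - 1 ∉ pvSk bbin k := by
  have hp := pvSk_pairwise bbin k
  rw [hS] at hp ⊢
  intro hmem
  rcases List.mem_cons.mp hmem with h | h
  · omega
  · rw [List.pairwise_cons] at hp
    have := hp.1 _ h
    omega

-- inS (as written in port B) decides membership in S_k
lemma pvInS_iff (bbin : List Int) (k : Int) (j : Int) :
    (j == k || (decide (1 ≤ j) && decide (j < k) && (PySem.List.pyGetD bbin (j - 1) 0 == 1))) = true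
      ↔ j ∈ pvSk bbin k := by
  simp only [pvSk, List.mem_append, List.mem_filter, PySem.List.mem_pyRange_one,
    List.mem_singleton, Bool.or_eq_true, Bool.and_eq_true, beq_iff_eq, decide_eq_true_eq]
  tauto

lemma pvElemB_eq (bbin : List Int) (m : Nat) (k : Int) (hk : 1 ≤ k) :
    pvElemB bbin m k = pvElemA bbin m k := by
  obtain ⟨s0, rest, hS⟩ := List.exists_cons_of_ne_nil (pvSk_ne_nil bbin k)
  -- the A-side element, reduced
  have hSk0 : (PySem.List.pyRange 1 k 1).foldl
      (fun acc j => if PySem.List.pyGetD bbin (j - 1) 0 == 1 then acc ++ [j] else acc) [] ++ [k]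
      = pvSk bbin k := by
    rw [PySem.List.foldl_append_if_eq_filter]; simp [pvSk]
  have hs0 : PySem.List.pyGetD [s0] (-1) 0 = s0 := by
    simpa using PySem.List.pyGetD_neg_one_append_singleton (xs := []) (x := s0) (d := 0)
  have hblocks : ∀ (c : List Int) (b : List Int),
      (match b with
       | [] => c
       | b0 :: bt => bt.foldl (fun c j => PySem.List.pySetD c (j - 1) (-1))
           (PySem.List.pySetD c (b0 - 1) 1))
        = (pvPerBlock b).foldl pvSetF c := by
    intro c b
    cases b with
    | nil => rfl
    | cons b0 bt => simp [pvPerBlock, pvSetF, List.foldl_map]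
  have hTA : pvTailAssign s0 rest
      = rest.map (fun j => (j - 1, if j - 1 ∈ pvSk bbin k then (-1 : Int) else 1)) :=
    pvTailAssign_mem (pvSk bbin k) (pvSk_pairwise bbin k) rest [] s0 (by simpa using hS)
  rw [hS] at hTA
  have hA : pvElemA bbin m k =
      (((s0 - 1, (1 : Int)) ::
          rest.map (fun j => (j - 1, if j - 1 ∈ s0 :: rest then (-1 : Int) else 1))).foldl
        pvSetF (List.replicate m (0 : Int)),
       (1 + (rest.countP (fun j => decide (j - 1 ∉ s0 :: rest)) : Int)) - 1) := by
    show ((match (PySem.List.pyRange 1 k 1).foldl _ [] ++ [k] with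
      | [] => ([] : List (List Int))
      | s0 :: rest => (rest.foldl gtA_step (([] : List (List Int)), [s0])).1
          ++ [(rest.foldl gtA_step (([] : List (List Int)), [s0])).2]).foldl _ _,
      ((match (PySem.List.pyRange 1 k 1).foldl _ [] ++ [k] with
      | [] => ([] : List (List Int))
      | s0 :: rest => (rest.foldl gtA_step (([] : List (List Int)), [s0])).1
          ++ [(rest.foldl gtA_step (([] : List (List Int)), [s0])).2]).length : Int) - 1) = _
    rw [hSk0, hS]
    simp only []
    rw [pvRuns_fold rest [] [s0] (by simp), hs0, List.nil_append]
    refine Prod.ext_iff.mpr ⟨?_, ?_⟩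
    · show List.foldl _ _ (pvRuns [s0] s0 rest) = _
      rw [PySem.List.foldl_congr_mem (pvRuns [s0] s0 rest) _
        (fun c b => (pvPerBlock b).foldl pvSetF c) _ (fun acc x _ => hblocks acc x)]
      rw [foldl_flatMap_foldl, pvRuns_flatMap, hTA]
      simp
    · show ((pvRuns [s0] s0 rest).length : Int) - 1 = _
      rw [pvRuns_length, hTA]
      rw [List.countP_map]
      have : ∀ j : Int, ((fun iv : Int × Int => iv.2 == 1) ∘
          (fun j => (j - 1, if j - 1 ∈ s0 :: rest then (-1 : Int) else 1))) j
          = decide (j - 1 ∉ s0 :: rest) := by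
        intro j
        by_cases h : j - 1 ∈ s0 :: rest
        · simp only [Function.comp_apply, if_pos h, decide_eq_false (not_not_intro h)]
          decide
        · simp only [Function.comp_apply, if_neg h, decide_eq_true h]
          decide
      rw [List.countP_congr (fun j _ => by rw [this j])]
      push_cast
      ring
  -- the B-side element, reduced to the same data
  have hiff : ∀ j : Int,
      (j == k || (decide (1 ≤ j) && decide (j < k) && (PySem.List.pyGetD bbin (j - 1) 0 == 1))) = true
        ↔ j ∈ s0 :: rest := by
    intro j; rw [pvInS_iff bbin k j, hS]
  have hns : s0 - 1 ∉ s0 :: rest := by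
    have := pvHead_not_mem bbin k s0 rest hS; rwa [hS] at this
  have hfil : (PySem.List.pyRange 1 (k + 1) 1).filter
      (fun j => j == k || (decide (1 ≤ j) && decide (j < k) && (PySem.List.pyGetD bbin (j - 1) 0 == 1)))
      = s0 :: rest := by
    rw [← hS, PySem.List.pyRange_one_succ_right (by omega : (1 : Int) ≤ k), List.filter_append]
    unfold pvSk
    congr 1
    · refine List.filter_congr (fun j hj => ?_)
      have hj' := (PySem.List.mem_pyRange_one).mp hj
      simp [hj'.1, hj'.2, show j ≠ k by omega]
    · simp
  have hcp : (PySem.List.pyRange 1 (k + 1) 1).foldl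
      (fun (cp : List Int × Int) j =>
        if (j == k || (decide (1 ≤ j) && decide (j < k) && (PySem.List.pyGetD bbin (j - 1) 0 == 1))) then
          if (j - 1 == k || (decide (1 ≤ j - 1) && decide (j - 1 < k) && (PySem.List.pyGetD bbin (j - 1 - 1) 0 == 1))) then
            (PySem.List.pySetD cp.1 (j - 1) (-1), cp.2)
          else (PySem.List.pySetD cp.1 (j - 1) 1, cp.2 + 1)
        else cp) (List.replicate m (0 : Int), (0 : Int))
      = (((s0 - 1, (1 : Int)) ::
            rest.map (fun j => (j - 1, if j - 1 ∈ s0 :: rest then (-1 : Int) else 1))).foldl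
          pvSetF (List.replicate m (0 : Int)),
         1 + (rest.countP (fun j => decide (j - 1 ∉ s0 :: rest)) : Int)) := by
    rw [PySem.List.foldl_if_eq_foldl_filter, hfil]
    rw [PySem.List.foldl_congr_mem (s0 :: rest) _
      (fun (cp : List Int × Int) j =>
        (PySem.List.pySetD cp.1 (j - 1) (if j - 1 ∈ s0 :: rest then (-1 : Int) else 1),
         cp.2 + (if j - 1 ∈ s0 :: rest then (0 : Int) else 1))) _
      (fun acc j _ => by
        dsimp only
        by_cases hm : j - 1 ∈ s0 :: rest
        · rw [if_pos ((hiff (j - 1)).mpr hm), if_pos hm, if_pos hm]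
          simp
        · rw [if_neg (fun h => hm ((hiff (j - 1)).mp h)), if_neg hm, if_neg hm])]
    rw [PySem.List.foldl_prod_mk
      (f := fun (c : List Int) j => PySem.List.pySetD c (j - 1) (if j - 1 ∈ s0 :: rest then (-1 : Int) else 1))
      (g := fun (p : Int) j => p + (if j - 1 ∈ s0 :: rest then (0 : Int) else 1))]
    refine Prod.ext_iff.mpr ⟨?_, ?_⟩
    · simp only [List.foldl_cons]
      rw [if_neg hns, List.foldl_map]
      rfl
    · simp only [List.foldl_cons]
      rw [if_neg hns]
      rw [PySem.List.foldl_add rest (fun j => if j - 1 ∈ s0 :: rest then (0 : Int) else 1) (0 + 1)]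
      have hmc : rest.map (fun j => if j - 1 ∈ s0 :: rest then (0 : Int) else 1)
          = rest.map (fun j => if (fun j => decide (j - 1 ∉ s0 :: rest)) j = true then (1 : Int) else 0) := by
        refine List.map_congr_left (fun j _ => ?_)
        by_cases h : j - 1 ∈ s0 :: rest <;> simp [h]
      rw [hmc, PySem.List.sum_map_ite_one_zero]
      ring
  -- assemble
  rw [hA]
  simp only [pvElemB]
  rw [hcp]

lemma genA_eq (a n : Int) :
    generate_theorem2 a n =
      PySem.Set.ofList ((PySem.Set.ofList
        (((PySem.List.pyRange 1 (n + 1) 1).filter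
            (fun k => PySem.List.pyGetD (get_binary ((2 ^ n.toNat - 1) - a) n) (k - 1) 0 == 0)).map
          (pvElemA (get_binary ((2 ^ n.toNat - 1) - a) n) n.toNat))).map pvMirror) := by
  show (((PySem.List.pyRange 1 (n + 1) 1).foldl _ PySem.Set.empty : PySem.Set (List Int × Int)).foldl _ PySem.Set.empty) = _
  rw [PySem.List.foldl_if_eq_foldl_filter]
  show List.foldl (fun (mirrored : PySem.Set (List Int × Int)) ci => PySem.Set.add mirrored (pvMirror ci))
      PySem.Set.empty
      (List.foldl (fun (s : PySem.Set (List Int × Int)) k =>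
          PySem.Set.add s (pvElemA (get_binary ((2 ^ n.toNat - 1) - a) n) n.toNat k))
        PySem.Set.empty
        (List.filter (fun k => PySem.List.pyGetD (get_binary ((2 ^ n.toNat - 1) - a) n) (k - 1) 0 == 0)
          (PySem.List.pyRange 1 (n + 1) 1))) = _
  rw [← PySem.Set.update_map_eq_foldl_add, PySem.Set.update_empty]
  rw [← PySem.Set.update_map_eq_foldl_add, PySem.Set.update_empty]

lemma genB_eq (a n : Int) :
    generate_theorem2_alt a n =
      PySem.Set.ofList ((PySem.Set.ofList
        (((PySem.List.pyRange 1 (n + 1) 1).filter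
            (fun k => PySem.List.pyGetD (get_binary ((2 ^ n.toNat - 1) - a) n) (k - 1) 0 == 0)).map
          (pvElemB (get_binary ((2 ^ n.toNat - 1) - a) n) n.toNat))).map pvMirror) := by
  show (((PySem.List.pyRange 1 (n + 1) 1).foldl _ PySem.Set.empty : PySem.Set (List Int × Int)).foldl _ PySem.Set.empty) = _
  rw [PySem.List.foldl_if_eq_foldl_filter]
  show List.foldl (fun (mirrored : PySem.Set (List Int × Int)) ci => PySem.Set.add mirrored (pvMirror ci))
      PySem.Set.empty
      (List.foldl (fun (s : PySem.Set (List Int × Int)) k =>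
          PySem.Set.add s (pvElemB (get_binary ((2 ^ n.toNat - 1) - a) n) n.toNat k))
        PySem.Set.empty
        (List.filter (fun k => PySem.List.pyGetD (get_binary ((2 ^ n.toNat - 1) - a) n) (k - 1) 0 == 0)
          (PySem.List.pyRange 1 (n + 1) 1))) = _
  rw [← PySem.Set.update_map_eq_foldl_add, PySem.Set.update_empty]
  rw [← PySem.Set.update_map_eq_foldl_add, PySem.Set.update_empty]

-- ===== VERDICT (by name: the statement is the Claim_ definition above) =====
theorem generate_theorem2_spec : Claim_equal_generate_theorem2 := by
  intro a n _ _
  unfold Spec_generate_theorem2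
  rw [genA_eq, genB_eq]
  have : (((PySem.List.pyRange 1 (n + 1) 1).filter
        (fun k => PySem.List.pyGetD (get_binary ((2 ^ n.toNat - 1) - a) n) (k - 1) 0 == 0)).map
      (pvElemA (get_binary ((2 ^ n.toNat - 1) - a) n) n.toNat))
      = (((PySem.List.pyRange 1 (n + 1) 1).filter
        (fun k => PySem.List.pyGetD (get_binary ((2 ^ n.toNat - 1) - a) n) (k - 1) 0 == 0)).map
      (pvElemB (get_binary ((2 ^ n.toNat - 1) - a) n) n.toNat)) := by
    refine List.map_congr_left (fun k hk => ?_)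
    have hk1 : 1 ≤ k := by
      have := (PySem.List.mem_pyRange_one).mp (List.mem_of_mem_filter hk)
      omega
    exact (pvElemB_eq _ _ k hk1).symm
  rw [this]
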